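/- PORTED by tools/port_fixed.py from Prog/Jsmn/D/Init.lean to THE FIXED IMAGE fixed/jsmn_d.bin (same bytes at the same addresses; binFD). Do not edit: edit the original and port again. -/
/-
  jsmn_d.bin: `jsmn_init` (21 bytes at 100555H, 4 instructions): `parser->pos = 0; parser->toknext = 0; parser->toksuper = -1`.
-/
import Prog.Jsmn.Fixed.Specs
import Prog.Jsmn.State
import Prog.Jsmn.Fixed.CodeFD

namespace X86
namespace J6
namespace FD
open X86.User (CodeAt RegsKept Span FlagsOK Layout toNat_add_ofNat toNat_ofNat_lt' add_ofNat_add)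
open Jsmn JsmnFDBytes

set_option maxRecDepth 100000
set_option maxHeartbeats 4000000
set_option linter.unusedSimpArgs false
set_option linter.unusedVariables false

variable {n : User.Layout} {v0 : User.State} {ret pa : Word}

theorem init_reach (hp : InitPre binFD n v0 ret pa) :
    Reach n v0 (fun v => CallPost v0 0 [(pa.toNat, pa.toNat + 12)] ret v ∧ ParserAt v.mem pa Parser.init) := by
  v3_open hp
  j6f_bin
  have hcode := JsmnFD.tjfd_jsmn_init_code hp_call_img
  v3_walk hcode hp.call.fetch [hp_call_retAddr, hp_call_retlt]
  refine Reach.done ⟨⟨by simp [hretW], by simp, RegsKept.saved (S := [.rsp]) (by v3_kept) rfl, by v3_same⟩, ?_⟩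
  v3_memnorm
  exact ⟨by show _ = 0; v3_read, by show _ = 0; v3_read, holds32_read (by v3_read) holds32_neg1⟩

/-- **`jsmn_init` of jsmn_d.bin leaves `Parser.init` in the parser struct.** -/
theorem init_spec (n : User.Layout) : InitSpec binFD n := fun _ _ _ h => init_reach h

end FD
end J6
end X86
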